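-- pv_equiv track=rewrite | github.com/mygorithm2020/PythonPractice | algorithmIntroductionwithDataStructure/search/binary01.py | tri_search
-- ===== SOURCE A (Python) =====
-- from typing import Any, Sequence
--
-- def tri_search(a: Sequence, key:Any) ->int:
--     pl = 0              #왼쪽 인덱스
--     pr = len(a) - 1     # 오른쪽 인덱스
--
--     while(True):
--         pc1 = (2*pl + pr) // 3        # 1 중앙 인덱스
--         pc2 = (pl + 2 * pr) // 3    # 2 중앙 인덱스
--         if a[pc1] == key:
--             return pc1
--         elif a[pc2] == key:
--             return pc2
--         else:
--             if key < a[pc1]: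
--                 pr = pc1 - 1
--             elif key < a[pc2]:
--                 pl = pc1 + 1
--                 pr = pc2 - 1
--             else:
--                 pl = pc2 + 1
--
--         if pl > pr :
--             break
--     return -1
-- ===== SOURCE B (Python) =====
-- def tri_search(a, key):
--     def go(lo, hi):  # half-open subrange [lo, hi), all indices non-negative
--         if lo >= hi:
--             return -1
--         pc1 = (2 * lo + hi - 1) // 3
--         pc2 = (lo + 2 * (hi - 1)) // 3
--         if a[pc1] == key:
--             return pc1
--         if a[pc2] == key:
--             return pc2
--         if key < a[pc1]:
--             return go(lo, pc1)
--         if key < a[pc2]: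
--             return go(pc1 + 1, pc2)
--         return go(pc2 + 1, hi)
--     return go(0, len(a))
-- ===== Notes on version B (the rewrite author's own statement) =====
-- stated objective: alternative
-- what changed: A's while-True loop over mutable inclusive Int bounds with a probe-first, bounds-check-after break is re-decomposed as a recursive divide-and-conquer helper over half-open non-negative index ranges that checks emptiness before probing, with the probe formulas rewritten for the half-open representation.
import Mathlib
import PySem

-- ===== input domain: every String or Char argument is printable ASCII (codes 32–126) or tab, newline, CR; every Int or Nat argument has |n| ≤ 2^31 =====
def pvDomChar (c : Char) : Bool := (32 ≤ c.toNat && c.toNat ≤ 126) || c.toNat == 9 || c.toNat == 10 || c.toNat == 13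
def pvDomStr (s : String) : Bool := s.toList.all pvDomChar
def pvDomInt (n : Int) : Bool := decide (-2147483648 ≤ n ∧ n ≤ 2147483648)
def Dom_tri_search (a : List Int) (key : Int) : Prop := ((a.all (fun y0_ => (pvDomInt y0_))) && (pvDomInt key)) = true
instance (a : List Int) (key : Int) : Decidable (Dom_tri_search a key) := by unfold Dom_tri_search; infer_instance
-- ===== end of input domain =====

-- B re-decomposes A's iterative Int-bound while-loop as a recursive helper over half-open
-- non-negative index ranges that checks emptiness before probing; same cost, no speed claim.
-- Pre_ excludes only the empty list, where A raises IndexError.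

-- ===== PORT A =====
-- A's while-True loop over mutable inclusive Int bounds pl/pr: each iteration probes a[pc1]
-- and a[pc2] first, updates one bound, then tests `pl > pr` and breaks with -1. The fuel is
-- only a totality device: the range shrinks every iteration, so a.length + 1 fuel is never
-- exhausted on a real run; the `.getD 0` default is likewise unreachable under Pre_ (a ≠ []).
def triLoop (a : List Int) (key : Int) : Nat → Int → Int → Int
  | 0, _, _ => -1
  | fuel + 1, pl, pr =>
    if (PySem.List.pyGet? a (PySem.Int.floordiv (2*pl + pr) 3)).getD 0 = key then
      PySem.Int.floordiv (2*pl + pr) 3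
    else if (PySem.List.pyGet? a (PySem.Int.floordiv (pl + 2*pr) 3)).getD 0 = key then
      PySem.Int.floordiv (pl + 2*pr) 3
    else if key < (PySem.List.pyGet? a (PySem.Int.floordiv (2*pl + pr) 3)).getD 0 then
      if pl > PySem.Int.floordiv (2*pl + pr) 3 - 1 then -1
      else triLoop a key fuel pl (PySem.Int.floordiv (2*pl + pr) 3 - 1)
    else if key < (PySem.List.pyGet? a (PySem.Int.floordiv (pl + 2*pr) 3)).getD 0 then
      if PySem.Int.floordiv (2*pl + pr) 3 + 1 > PySem.Int.floordiv (pl + 2*pr) 3 - 1 then -1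
      else triLoop a key fuel (PySem.Int.floordiv (2*pl + pr) 3 + 1) (PySem.Int.floordiv (pl + 2*pr) 3 - 1)
    else
      if PySem.Int.floordiv (pl + 2*pr) 3 + 1 > pr then -1
      else triLoop a key fuel (PySem.Int.floordiv (pl + 2*pr) 3 + 1) pr

def tri_search (a : List Int) (key : Int) : Int :=
  triLoop a key (a.length + 1) 0 ((a.length : Int) - 1)

-- ===== PORT B =====
-- B's recursive helper go(lo, hi) over the half-open range [lo, hi) of non-negative indices:
-- emptiness check first, then the two probes (all indices provably in range, so plain Nat
-- indexing), recursing on the chosen half-open subrange. Same fuel totality device.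
def triGo (a : List Int) (key : Int) : Nat → Nat → Nat → Int
  | 0, _, _ => -1
  | fuel + 1, lo, hi =>
    if lo ≥ hi then -1
    else
      let pc1 := (2*lo + hi - 1) / 3
      let pc2 := (lo + 2*(hi - 1)) / 3
      if a.getD pc1 0 = key then (pc1 : Int)
      else if a.getD pc2 0 = key then (pc2 : Int)
      else if key < a.getD pc1 0 then triGo a key fuel lo pc1
      else if key < a.getD pc2 0 then triGo a key fuel (pc1 + 1) pc2
      else triGo a key fuel (pc2 + 1) hi

def tri_search_alt (a : List Int) (key : Int) : Int :=
  triGo a key (a.length + 1) 0 a.length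

-- ===== PRECONDITION & SPEC =====
-- Pre_ excludes only the empty list: there A's very first probe a[pc1] (pc1 = -1) raises
-- IndexError before any bounds test, so A returns no value.
def Pre_tri_search (a : List Int) (key : Int) : Prop := a ≠ []
instance (a : List Int) (key : Int) : Decidable (Pre_tri_search a key) := by unfold Pre_tri_search; infer_instance
def pvWitness_tri_search : List Int × Int := ([1, 4, 4, 9], 4)

def Spec_tri_search (a : List Int) (key : Int) (out : Int) : Prop := out = tri_search_alt a key
instance (a : List Int) (key : Int) (out : Int) : Decidable (Spec_tri_search a key out) := by unfold Spec_tri_search; infer_instance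

-- ===== CLAIM (what is proved, stated in full; the proofs are below) =====
def Claim_equal_tri_search : Prop := ∀ (a : List Int) (key : Int), Dom_tri_search a key → Pre_tri_search a key → Spec_tri_search a key (tri_search a key)
-- ===== LEMMAS AND PROOFS =====

-- B's go returns -1 outright on an empty half-open range, at any fuel.
theorem triGo_empty (a : List Int) (key : Int) (fuel : Nat) (lo hi : Nat) (h : lo ≥ hi) :
    triGo a key fuel lo hi = -1 := by
  cases fuel with
  | zero => rfl
  | succ n => rw [triGo, if_pos h]

-- One iteration of A's loop on the inclusive Int range [lo, hi-1] is one step of B's go on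
-- the half-open Nat range [lo, hi): the probe indices coincide, A's after-update `pl > pr`
-- break matches B's on-entry emptiness check, and both fall back to -1 at fuel 0.
theorem triLoop_eq_triGo (a : List Int) (key : Int) (fuel : Nat) :
    ∀ (lo hi : Nat), lo < hi → hi ≤ a.length →
      triLoop a key fuel (lo : Int) ((hi : Int) - 1) = triGo a key fuel lo hi := by
  induction fuel with
  | zero => intro lo hi _ _; rfl
  | succ n ih =>
    intro lo hi hlt hle
    have h1 : PySem.Int.floordiv (2*(lo : Int) + ((hi : Int) - 1)) 3
        = (((2*lo + hi - 1) / 3 : Nat) : Int) := by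
      rw [PySem.Int.floordiv_eq_ediv_of_pos (by omega)]; omega
    have h2 : PySem.Int.floordiv ((lo : Int) + 2*((hi : Int) - 1)) 3
        = (((lo + 2*(hi - 1)) / 3 : Nat) : Int) := by
      rw [PySem.Int.floordiv_eq_ediv_of_pos (by omega)]; omega
    rw [triLoop, triGo, if_neg (by omega : ¬ lo ≥ hi), h1, h2]
    simp only [PySem.List.pyGet?_natCast]
    have hb1 : (2*lo + hi - 1) / 3 < a.length := by omega
    have hb2 : (lo + 2*(hi - 1)) / 3 < a.length := by omega
    have hg1 : a[(2*lo + hi - 1) / 3]? = some (a.getD ((2*lo + hi - 1) / 3) 0) := by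
      rw [List.getElem?_eq_getElem hb1, List.getD_eq_getElem a 0 hb1]
    have hg2 : a[(lo + 2*(hi - 1)) / 3]? = some (a.getD ((lo + 2*(hi - 1)) / 3) 0) := by
      rw [List.getElem?_eq_getElem hb2, List.getD_eq_getElem a 0 hb2]
    rw [hg1, hg2]
    simp only [Option.getD_some]
    split_ifs with c1 c2 c3 g1 c4 g2 g3
    · rfl
    · rfl
    · -- A breaks (lo > pc1 - 1), B's range [lo, pc1) is empty
      exact (triGo_empty a key n lo _ (by omega)).symm
    · -- recurse on left subrange
      exact ih lo ((2*lo + hi - 1) / 3) (by omega) (by omega)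
    · exact (triGo_empty a key n _ _ (by omega)).symm
    · -- recurse on middle subrange
      have hlt' : (2*lo + hi - 1) / 3 + 1 < (lo + 2*(hi - 1)) / 3 := by omega
      have := ih ((2*lo + hi - 1) / 3 + 1) ((lo + 2*(hi - 1)) / 3) hlt' (by omega)
      rw [← this]; congr 1
    · exact (triGo_empty a key n _ _ (by omega)).symm
    · -- recurse on right subrange
      have hlt' : (lo + 2*(hi - 1)) / 3 + 1 < hi := by omega
      have := ih ((lo + 2*(hi - 1)) / 3 + 1) hi hlt' hle
      rw [← this]; congr 1

-- ===== VERDICT (by name: the statement is the Claim_ definition above) =====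
theorem tri_search_spec : Claim_equal_tri_search := by
  intro a key _ hpre
  have hlen : 0 < a.length := List.length_pos_iff.mpr hpre
  show tri_search a key = tri_search_alt a key
  unfold tri_search tri_search_alt
  exact triLoop_eq_triGo a key (a.length + 1) 0 a.length hlen le_rfl
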